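-- pv_equiv track=rewrite | github.com/hangoh/inventory-management | Store/services/store_services.py | calculate_remaining_product_quantity_service
-- ===== SOURCE A (Python) =====
-- def calculate_remaining_product_quantity_service(material_quantity, material_stock_current_capacity):
--     """
--     The logic is that if any of the number in material_stock_current_capacity
--     is less than(<) zero than it will return the current quantity since all material should
--     have the sufficient amount to produce the product
--     """
--     material_sufficient = True
--     quantity = 0
--     # only execute the logic below if both material quantity and material stock current capacity array are not empty
--     if material_quantity != [] and material_stock_current_capacity != []:
--         while material_sufficient:
--             # loop through material stock current capacity
--             current_index = 0
--             for each_stock_capacity in material_stock_current_capacity: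
--                 # if material stock current capacity minus material quantity is negative, return the current quantity else quantity + 1
--                 if not (each_stock_capacity - material_quantity[current_index] >= 0):
--                     material_sufficient = False
--                     return quantity
--                 material_stock_current_capacity[current_index] -= material_quantity[current_index]
--                 if current_index < len(material_quantity):
--                     current_index += 1
--             quantity += 1
--     return quantity
-- ===== SOURCE B (Python) =====
-- def calculate_remaining_product_quantity_service(material_quantity, material_stock_current_capacity):
--     # One pass: the answer is min over paired materials of floor(stock/qty) for
--     # positive qty (a qty<=0 pair only matters when stock<qty, which blocks round 0),
--     # clamped below by 0. (Unlike A, does not mutate the stock list.)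
--     best = None
--     for q, s in zip(material_quantity, material_stock_current_capacity):
--         if q > 0:
--             cap = s // q
--         elif s < q:
--             cap = 0
--         else:
--             continue
--         if best is None or cap < best:
--             best = cap
--     if best is None or best < 0:
--         return 0
--     return best
-- ===== Notes on version B (the rewrite author's own statement) =====
-- stated objective: alternative
-- what changed: Replaces A's round-by-round simulation (repeatedly subtracting the quantity vector from the stock, mutating the list, until some entry would go negative) by a single zip pass taking the minimum of floor(stock_i/qty_i) over positive quantities (0 for a qty<=0 pair with stock<qty), clamped at 0; B does not mutate the stock list. Pre_ excludes only inputs where A raises IndexError (stock longer than quantity with no immediate shortage) or loops forever (no positive quantity and no immediate shortage).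
import Mathlib
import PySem

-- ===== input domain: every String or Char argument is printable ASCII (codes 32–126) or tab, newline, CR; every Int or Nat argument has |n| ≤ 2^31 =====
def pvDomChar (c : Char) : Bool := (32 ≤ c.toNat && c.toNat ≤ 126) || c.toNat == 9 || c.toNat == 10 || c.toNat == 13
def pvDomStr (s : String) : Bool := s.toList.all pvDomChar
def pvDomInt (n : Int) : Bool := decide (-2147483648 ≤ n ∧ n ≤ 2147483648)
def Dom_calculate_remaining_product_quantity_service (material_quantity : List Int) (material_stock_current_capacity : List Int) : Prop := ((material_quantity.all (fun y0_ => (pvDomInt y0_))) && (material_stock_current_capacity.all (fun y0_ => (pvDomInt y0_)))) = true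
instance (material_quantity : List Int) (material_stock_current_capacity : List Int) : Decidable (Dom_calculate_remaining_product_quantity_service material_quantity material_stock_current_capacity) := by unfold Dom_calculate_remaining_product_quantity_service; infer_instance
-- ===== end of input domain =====

-- B replaces A's round-by-round subtraction simulation by one min-of-floordiv pass
-- over the zipped lists; A mutates the stock list in place, B does not — the
-- equivalence proved here is about the return value only.

-- ===== PORT A =====
-- inner 'for each_stock_capacity in material_stock_current_capacity' loop of one
-- round of A's while loop: 'none' = early 'return quantity' (or the place where
-- Python would raise IndexError, which Pre_ excludes), 'some stock'' = round done
-- with the mutated stock list.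
def pvARound (q : List Int) : List Int → Int → Option (List Int)
  | [], _ => some []
  | s :: rest, i =>
      match PySem.List.pyGet? q i with
      | none => none  -- Python raises IndexError here; outside Pre_ (dead under Pre_)
      | some qi =>
        if ¬ (s - qi ≥ 0) then none
        else
          match pvARound q rest (if i < (q.length : Int) then i + 1 else i) with
          | none => none
          | some rest' => some ((s - qi) :: rest')

-- fuel guard for A's 'while material_sufficient' loop (A can loop forever; Pre_
-- excludes those inputs, and the fuel is proved sufficient under Pre_).
def pvFuel (stock : List Int) : Nat := (stock.map Int.natAbs).sum + 2

def pvALoop (q : List Int) : Nat → List Int → Int → Int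
  | 0, _, quantity => quantity  -- fuel exhausted: unreachable under Pre_
  | fuel + 1, stock, quantity =>
      match pvARound q stock 0 with
      | none => quantity
      | some stock' => pvALoop q fuel stock' (quantity + 1)

def calculate_remaining_product_quantity_service (material_quantity : List Int) (material_stock_current_capacity : List Int) : Int :=
  if material_quantity ≠ [] ∧ material_stock_current_capacity ≠ [] then
    pvALoop material_quantity (pvFuel material_stock_current_capacity) material_stock_current_capacity 0
  else 0

-- ===== PORT B =====
def pvBUpdate (best : Option Int) (cap : Int) : Option Int :=
  match best with
  | none => some cap
  | some b => if cap < b then some cap else some b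

def pvBStep (best : Option Int) (p : Int × Int) : Option Int :=
  if p.1 > 0 then pvBUpdate best (PySem.Int.floordiv p.2 p.1)
  else if p.2 < p.1 then pvBUpdate best 0
  else best

def calculate_remaining_product_quantity_service_alt (material_quantity : List Int) (material_stock_current_capacity : List Int) : Int :=
  match (material_quantity.zip material_stock_current_capacity).foldl pvBStep none with
  | none => 0
  | some b => if b < 0 then 0 else b

-- ===== PRECONDITION & SPEC =====
-- Pre_ excludes exactly the inputs where A does not return: IndexError (stock list
-- longer than quantity list with no shortage at a shared index) and divergence
-- (no paired quantity is positive and no shortage, so no round ever stops).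
def Pre_calculate_remaining_product_quantity_service (material_quantity : List Int) (material_stock_current_capacity : List Int) : Prop :=
  material_quantity = [] ∨ material_stock_current_capacity = [] ∨
    ((material_stock_current_capacity.length ≤ material_quantity.length ∨
        ∃ p ∈ material_quantity.zip material_stock_current_capacity, p.2 < p.1) ∧
     ∃ p ∈ material_quantity.zip material_stock_current_capacity, 0 < p.1 ∨ p.2 < p.1)
instance (material_quantity : List Int) (material_stock_current_capacity : List Int) : Decidable (Pre_calculate_remaining_product_quantity_service material_quantity material_stock_current_capacity) := by unfold Pre_calculate_remaining_product_quantity_service; infer_instance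

def pvWitness_calculate_remaining_product_quantity_service : List Int × List Int := ([2, 3], [7, 9])

def Spec_calculate_remaining_product_quantity_service (material_quantity : List Int) (material_stock_current_capacity : List Int) (out : Int) : Prop := out = calculate_remaining_product_quantity_service_alt material_quantity material_stock_current_capacity
instance (material_quantity : List Int) (material_stock_current_capacity : List Int) (out : Int) : Decidable (Spec_calculate_remaining_product_quantity_service material_quantity material_stock_current_capacity out) := by unfold Spec_calculate_remaining_product_quantity_service; infer_instance

-- ===== CLAIM (what is proved, stated in full; the proofs are below) =====
def Claim_equal_calculate_remaining_product_quantity_service : Prop := ∀ (material_quantity : List Int) (material_stock_current_capacity : List Int), Dom_calculate_remaining_product_quantity_service material_quantity material_stock_current_capacity → Pre_calculate_remaining_product_quantity_service material_quantity material_stock_current_capacity → Spec_calculate_remaining_product_quantity_service material_quantity material_stock_current_capacity (calculate_remaining_product_quantity_service material_quantity material_stock_current_capacity)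


-- ===== LEMMAS AND PROOFS =====

-- contribution of one (quantity, stock) pair to B's running minimum
def pvCapOf (p : Int × Int) : Option Int :=
  if p.1 > 0 then some (PySem.Int.floordiv p.2 p.1)
  else if p.2 < p.1 then some 0 else none

theorem pvBStep_eq (best : Option Int) (p : Int × Int) :
    pvBStep best p = match pvCapOf p with | none => best | some c => pvBUpdate best c := by
  unfold pvBStep pvCapOf
  split_ifs <;> rfl

theorem pvFoldB_eq (z : List (Int × Int)) : ∀ b,
    z.foldl pvBStep b = (z.filterMap pvCapOf).foldl pvBUpdate b := by
  induction z with
  | nil => intro b; rfl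
  | cons p z ih =>
      intro b
      simp only [List.foldl_cons, List.filterMap_cons, pvBStep_eq]
      cases h : pvCapOf p <;> simp [ih]

theorem pvBUpdate_some (b c : Int) : pvBUpdate (some b) c = some (min b c) := by
  show (if c < b then some c else some b) = some (min b c)
  split_ifs with h <;> congr 1 <;> omega

theorem pvFoldU_some (cs : List Int) : ∀ b : Int,
    cs.foldl pvBUpdate (some b) = some (cs.foldl min b) := by
  induction cs with
  | nil => intro b; rfl
  | cons c cs ih => intro b; simp [pvBUpdate_some, ih]

theorem pvMinFold_le_init (cs : List Int) : ∀ b : Int, cs.foldl min b ≤ b := by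
  induction cs with
  | nil => intro b; simp
  | cons c cs ih =>
      intro b
      simpa using le_trans (ih (min b c)) (by omega)

theorem pvMinFold_le_mem (cs : List Int) : ∀ b c : Int, c ∈ cs → cs.foldl min b ≤ c := by
  induction cs with
  | nil => intro b c h; simp at h
  | cons a cs ih =>
      intro b c h
      rcases List.mem_cons.mp h with h | h
      · subst h
        exact le_trans (pvMinFold_le_init cs (min b c)) (by omega)
      · exact ih _ _ h

theorem pvMinFold_mem_or (cs : List Int) : ∀ b : Int,
    cs.foldl min b = b ∨ cs.foldl min b ∈ cs := by
  induction cs with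
  | nil => intro b; simp
  | cons c cs ih =>
      intro b
      rcases ih (min b c) with h | h
      · simp only [List.foldl_cons, h]
        rcases le_or_gt b c with hbc | hbc
        · left; omega
        · right; simp; omega
      · right; exact List.mem_cons_of_mem _ h

theorem pvMinFold_map_sub (cs : List Int) : ∀ b : Int,
    (cs.map (fun c => c - 1)).foldl min (b - 1) = cs.foldl min b - 1 := by
  induction cs with
  | nil => intro b; simp
  | cons c cs ih =>
      intro b
      simp only [List.map_cons, List.foldl_cons]
      rw [show min (b - 1) (c - 1) = min b c - 1 by omega, ih]

-- B's fold produces the minimum contribution: it is a contribution and a lower bound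
theorem pvM_spec (z : List (Int × Int)) (m : Int)
    (h : z.foldl pvBStep none = some m) :
    m ∈ z.filterMap pvCapOf ∧ ∀ c ∈ z.filterMap pvCapOf, m ≤ c := by
  rw [pvFoldB_eq] at h
  cases hcs : z.filterMap pvCapOf with
  | nil => rw [hcs] at h; simp [List.foldl] at h
  | cons c cs =>
      rw [hcs] at h
      simp only [List.foldl_cons, show pvBUpdate none c = some c from rfl,
        pvFoldU_some] at h
      obtain rfl : cs.foldl min c = m := Option.some_inj.mp h
      constructor
      · rcases pvMinFold_mem_or cs c with h | h
        · rw [h]; exact List.mem_cons_self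
        · exact List.mem_cons_of_mem _ h
      · intro c1 hc1
        rcases List.mem_cons.mp hc1 with h | h
        · subst h; exact pvMinFold_le_init _ _
        · exact pvMinFold_le_mem cs c c1 h

theorem pvM_isSome (z : List (Int × Int))
    (h : ∃ p ∈ z, (pvCapOf p).isSome) :
    ∃ m, z.foldl pvBStep none = some m := by
  obtain ⟨p, hp, hsome⟩ := h
  obtain ⟨c, hc⟩ := Option.isSome_iff_exists.mp hsome
  have hmem : c ∈ z.filterMap pvCapOf := List.mem_filterMap.mpr ⟨p, hp, hc⟩
  rw [pvFoldB_eq]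
  cases hcs : z.filterMap pvCapOf with
  | nil => rw [hcs] at hmem; simp at hmem
  | cons a cs =>
      refine ⟨(cs.foldl min a), ?_⟩
      simp [show pvBUpdate none a = some a from rfl, pvFoldU_some]

-- one round of A, characterised on the zipped view
theorem pvARound_eq (q : List Int) : ∀ (stock : List Int) (n : Nat),
    pvARound q stock (n : Int) =
      if (∀ j < stock.length, n + j < q.length) ∧
         (∀ p ∈ (q.drop n).zip stock, p.1 ≤ p.2)
      then some (((q.drop n).zip stock).map (fun p => p.2 - p.1))
      else none := by
  intro stock
  induction stock with
  | nil => intro n; simp [pvARound]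
  | cons s rest ih =>
      intro n
      by_cases hn : n < q.length
      · have hget : PySem.List.pyGet? q (n : Int) = some q[n] :=
          PySem.List.pyGet?_ofNat q n hn
        have hdrop : q.drop n = q[n] :: q.drop (n + 1) :=
          (List.getElem_cons_drop hn).symm
        by_cases hfail : s - q[n] ≥ 0
        · have hidx : (if (n : Int) < (q.length : Int) then (n : Int) + 1 else (n : Int))
              = ((n + 1 : Nat) : Int) := by
            rw [if_pos (by exact_mod_cast hn)]; push_cast; ring
          simp only [pvARound, hget, hidx]
          rw [if_neg (by omega), ih (n + 1), hdrop]
          by_cases hc : (∀ j < rest.length, n + 1 + j < q.length) ∧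
              (∀ p ∈ (q.drop (n + 1)).zip rest, p.1 ≤ p.2)
          · rw [if_pos hc, if_pos ?side]
            · rw [List.zip_cons_cons, List.map_cons]
            case side =>
              constructor
              · intro j hj
                cases j with
                | zero => simpa using hn
                | succ j => exact (by have := hc.1 j (by simpa using hj); omega)
              · intro p hp
                rw [List.zip_cons_cons] at hp
                rcases List.mem_cons.mp hp with h | h
                · subst h; omega
                · exact hc.2 p h
          · rw [if_neg hc, if_neg ?side2]
            case side2 =>
              intro ⟨h1, h2⟩
              apply hc
              constructor
              · intro j hj; have := h1 (j + 1) (by simpa using Nat.succ_lt_succ hj); omega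
              · intro p hp
                exact h2 p (by rw [List.zip_cons_cons]; exact List.mem_cons_of_mem _ hp)
        · simp only [pvARound, hget]
          rw [if_pos (by omega), if_neg ?side3]
          case side3 =>
            intro ⟨h1, h2⟩
            have := h2 (q[n], s) (by rw [hdrop, List.zip_cons_cons]; exact List.mem_cons_self)
            omega
      · have hget : PySem.List.pyGet? q (n : Int) = none := by
          rw [PySem.List.pyGet?_natCast]
          exact List.getElem?_eq_none (by omega)
        simp only [pvARound, hget]
        rw [if_neg ?side4]
        case side4 =>
          intro ⟨h1, _⟩
          have := h1 0 (by simp)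
          omega

-- re-zipping the updated stock shifts every pair
theorem pvZip_shift (q : List Int) : ∀ (stock : List Int), stock.length ≤ q.length →
    q.zip ((q.zip stock).map (fun p => p.2 - p.1)) =
      (q.zip stock).map (fun p => (p.1, p.2 - p.1)) := by
  induction q with
  | nil => intro stock h; simp at h; simp [h]
  | cons a q ih =>
      intro stock h
      cases stock with
      | nil => simp
      | cons s stock =>
          simp only [List.zip_cons_cons, List.map_cons]
          rw [ih stock (by simpa using h)]

-- the contributions of the shifted pairs are the old contributions minus one
theorem pvCaps_shift (z : List (Int × Int))
    (h0 : ∀ p ∈ z, p.1 ≤ 0 → p.1 ≤ p.2) :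
    (z.map (fun p => (p.1, p.2 - p.1))).filterMap pvCapOf =
      (z.filterMap pvCapOf).map (fun c => c - 1) := by
  induction z with
  | nil => simp
  | cons p z ih =>
      have htail := ih (fun p hp => h0 p (List.mem_cons_of_mem _ hp))
      by_cases hq : p.1 > 0
      · have hsub : PySem.Int.floordiv (p.2 - p.1) p.1 = PySem.Int.floordiv p.2 p.1 - 1 := by
          show (p.2 - p.1).fdiv p.1 = p.2.fdiv p.1 - 1
          have := Int.add_mul_fdiv_right p.2 (-1) (c := p.1) (by omega)
          simpa [sub_eq_add_neg, neg_mul] using this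
        simp only [List.map_cons, List.filterMap_cons]
        rw [show pvCapOf (p.1, p.2 - p.1) = some (PySem.Int.floordiv p.2 p.1 - 1) by
              simp only [pvCapOf]; rw [if_pos hq, hsub],
            show pvCapOf p = some (PySem.Int.floordiv p.2 p.1) by simp [pvCapOf, hq],
            htail]
        simp
      · have hp0 := h0 p (List.mem_cons_self) (by omega)
        have h1 : ¬ (p.2 < p.1) := by omega
        have h2 : ¬ (p.2 - p.1 < p.1) := by omega
        simp only [List.map_cons, List.filterMap_cons, pvCapOf]
        rw [if_neg hq, if_neg hq, if_neg h1, if_neg h2]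
        exact htail

-- 0 < b: the floor quotient is ≥ 1 iff the stock covers one round
theorem pvCap_pos_iff (a b : Int) (hb : 0 < b) :
    (1 ≤ PySem.Int.floordiv a b) ↔ b ≤ a := by
  rw [PySem.Int.le_floordiv_iff_mul_le hb]; omega

-- main loop characterisation under sufficient fuel
theorem pvALoop_eq (r : Nat) : ∀ (q stock : List Int) (fuel : Nat) (m quantity : Int),
    stock.length ≤ q.length →
    (q.zip stock).foldl pvBStep none = some m →
    r = m.toNat → r < fuel →
    pvALoop q fuel stock quantity = quantity + max 0 m := by
  induction r with
  | zero =>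
      intro q stock fuel m quantity hlen hM hr hfuel
      obtain ⟨hmem, hle⟩ := pvM_spec _ _ hM
      obtain ⟨p, hp, hcap⟩ := List.mem_filterMap.mp hmem
      have hm0 : m ≤ 0 := by omega
      have hfailp : p.2 < p.1 := by
        by_cases hq : p.1 > 0
        · have : PySem.Int.floordiv p.2 p.1 = m := by
            simpa [pvCapOf, hq] using hcap
          by_contra hge
          have := (pvCap_pos_iff p.2 p.1 hq).mpr (by omega)
          omega
        · by_contra hge
          simp [pvCapOf, hq, show ¬ (p.2 < p.1) by omega] at hcap
      obtain ⟨f, rfl⟩ : ∃ f, fuel = f + 1 := ⟨fuel - 1, by omega⟩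
      have hround : pvARound q stock 0 = none := by
        have := pvARound_eq q stock 0
        simp only [Nat.cast_zero, List.drop_zero] at this
        rw [this, if_neg]
        intro ⟨_, h2⟩
        have := h2 p (by simpa using hp)
        omega
      simp [pvALoop, hround]
      omega
  | succ r ih =>
      intro q stock fuel m quantity hlen hM hr hfuel
      obtain ⟨hmem, hle⟩ := pvM_spec _ _ hM
      have hm1 : 1 ≤ m := by omega
      have hok : ∀ p ∈ q.zip stock, p.1 ≤ p.2 := by
        intro p hp
        by_cases hq : p.1 > 0
        · have hc : pvCapOf p = some (PySem.Int.floordiv p.2 p.1) := by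
            simp [pvCapOf, hq]
          have := hle _ (List.mem_filterMap.mpr ⟨p, hp, hc⟩)
          exact (pvCap_pos_iff p.2 p.1 hq).mp (by omega)
        · by_contra hlt
          have hc : pvCapOf p = some 0 := by
            simp [pvCapOf, hq, show p.2 < p.1 by omega]
          have := hle _ (List.mem_filterMap.mpr ⟨p, hp, hc⟩)
          omega
      obtain ⟨f, rfl⟩ : ∃ f, fuel = f + 1 := ⟨fuel - 1, by omega⟩
      have hround : pvARound q stock 0 =
          some ((q.zip stock).map (fun p => p.2 - p.1)) := by
        have := pvARound_eq q stock 0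
        simp only [Nat.cast_zero, List.drop_zero] at this
        rw [this, if_pos ⟨fun j hj => by omega, by simpa using hok⟩]
      have hlen' : ((q.zip stock).map (fun p => p.2 - p.1)).length ≤ q.length := by
        simp only [List.length_map, List.length_zip]; omega
      have hzip' := pvZip_shift q stock hlen
      have h0 : ∀ p ∈ q.zip stock, p.1 ≤ 0 → p.1 ≤ p.2 := fun p hp _ => hok p hp
      have hM' : (q.zip ((q.zip stock).map (fun p => p.2 - p.1))).foldl pvBStep none
          = some (m - 1) := by
        rw [hzip', pvFoldB_eq, pvCaps_shift _ h0]
        rw [pvFoldB_eq] at hM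
        cases hcs : (q.zip stock).filterMap pvCapOf with
        | nil => rw [hcs] at hM; simp [List.foldl] at hM
        | cons c cs =>
            rw [hcs] at hM
            simp only [List.foldl_cons, show pvBUpdate none c = some c from rfl,
              pvFoldU_some, Option.some.injEq] at hM
            simp only [List.map_cons, List.foldl_cons,
              show pvBUpdate none (c - 1) = some (c - 1) from rfl,
              pvFoldU_some, Option.some.injEq]
            rw [pvMinFold_map_sub, hM]
      have := ih q _ f (m - 1) (quantity + 1) hlen' hM' (by omega) (by omega)
      simp only [pvALoop, hround]
      rw [this]
      omega

-- a bound element of a Nat list is at most the sum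
theorem pvMem_le_sum (l : List Nat) (x : Nat) (h : x ∈ l) : x ≤ l.sum :=
  List.le_sum_of_mem h

-- the minimum contribution fits under the fuel
theorem pvFuel_ok (q stock : List Int) (m : Int)
    (hM : (q.zip stock).foldl pvBStep none = some m) :
    m.toNat < pvFuel stock := by
  obtain ⟨hmem, -⟩ := pvM_spec _ _ hM
  obtain ⟨p, hp, hcap⟩ := List.mem_filterMap.mp hmem
  have hstock : p.2 ∈ stock := (List.of_mem_zip (a := p.1) (b := p.2) (by simpa using hp)).2
  have habs : p.2.natAbs ≤ (stock.map Int.natAbs).sum :=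
    pvMem_le_sum _ _ (List.mem_map.mpr ⟨p.2, hstock, rfl⟩)
  by_cases hm : m ≤ 0
  · unfold pvFuel; omega
  · have hq : p.1 > 0 := by
      by_contra hq
      simp only [pvCapOf, if_neg hq] at hcap
      split at hcap
      · simp only [Option.some.injEq] at hcap; omega
      · simp at hcap
    have hfd : PySem.Int.floordiv p.2 p.1 = m := by simpa [pvCapOf, hq] using hcap
    have hmul : m * p.1 ≤ p.2 := by
      have := (PySem.Int.le_floordiv_iff_mul_le (a := p.2) (b := p.1) (q := m) hq).mp
        (by omega)
      exact this
    have hmp : m ≤ m * p.1 := by nlinarith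
    have hmle : m ≤ p.2 := le_trans hmp hmul
    unfold pvFuel
    omega

-- ===== VERDICT (by name: the statement is the Claim_ definition above) =====
theorem calculate_remaining_product_quantity_service_spec : Claim_equal_calculate_remaining_product_quantity_service := by
  intro q stock _ hpre
  unfold Spec_calculate_remaining_product_quantity_service
  unfold calculate_remaining_product_quantity_service calculate_remaining_product_quantity_service_alt
  rcases hpre with hq | hstock | ⟨hlenor, p, hp, hterm⟩
  · subst hq; simp
  · subst hstock; simp
  · have hqne : q ≠ [] := by rintro rfl; simp at hp
    have hsne : stock ≠ [] := by rintro rfl; simp at hp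
    rw [if_pos ⟨hqne, hsne⟩]
    have hsomeM : ∃ m, (q.zip stock).foldl pvBStep none = some m := by
      apply pvM_isSome
      refine ⟨p, hp, ?_⟩
      by_cases hq1 : p.1 > 0
      · simp [pvCapOf, hq1]
      · simp [pvCapOf, hq1, show p.2 < p.1 by omega]
    obtain ⟨m, hM⟩ := hsomeM
    rcases hlenor with hlen | ⟨p', hp', hfail⟩
    · rw [pvALoop_eq m.toNat q stock (pvFuel stock) m 0 hlen hM rfl (pvFuel_ok q stock m hM), hM]
      show 0 + max 0 m = if m < 0 then 0 else m
      split_ifs with h <;> omega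
    · -- stock longer than quantity but an immediate shortage stops round 0
      obtain ⟨hmem, hle⟩ := pvM_spec _ _ hM
      have hcap' : ∃ c, pvCapOf p' = some c ∧ c ≤ 0 := by
        by_cases hq1 : p'.1 > 0
        · refine ⟨PySem.Int.floordiv p'.2 p'.1, by simp [pvCapOf, hq1], ?_⟩
          by_contra hgt
          have := (pvCap_pos_iff p'.2 p'.1 hq1).mp (by omega)
          omega
        · exact ⟨0, by simp [pvCapOf, hq1]; omega, le_refl 0⟩
      obtain ⟨c, hc, hc0⟩ := hcap'
      have hm0 : m ≤ 0 := le_trans (hle c (List.mem_filterMap.mpr ⟨p', hp', hc⟩)) hc0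
      have hround : pvARound q stock 0 = none := by
        have := pvARound_eq q stock 0
        simp only [Nat.cast_zero, List.drop_zero] at this
        rw [this, if_neg]
        intro ⟨_, h2⟩
        have := h2 p' (by simpa using hp')
        omega
      have hfuel : ∃ f, pvFuel stock = f + 1 := ⟨pvFuel stock - 1, by unfold pvFuel; omega⟩
      obtain ⟨f, hf⟩ := hfuel
      rw [hf]
      simp [pvALoop, hround, hM]
      omega
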